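-- pv_equiv track=rewrite | github.com/nsmkhn/symed | helpers.py | _find_indexes_of_repeated_sequences
-- ===== SOURCE A (Python) =====
-- def _find_indexes_of_repeated_sequences(text, seq_len):
--     d = {}
--     for i in range(len(text)-seq_len-1):
--         string = text[i:i+seq_len]
--         if string not in d:
--             d[string] = []
--         d[string].append(i)
--     return [indexes for indexes in d.values() if len(indexes) > 1]
-- ===== SOURCE B (Python) =====
-- def _find_indexes_of_repeated_sequences(text, seq_len):
--     n = len(text) - seq_len - 1
--     seen = set()
--     result = []
--     for i in range(n):
--         s = text[i:i+seq_len]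
--         if s in seen:
--             continue
--         seen.add(s)
--         group = [j for j in range(n) if text[j:j+seq_len] == s]
--         if len(group) > 1:
--             result.append(group)
--     return result
-- ===== Notes on version B (the rewrite author's own statement) =====
-- stated objective: alternative
-- what changed: Replaces A's one-pass dict-of-lists grouping with a dict-free scan: a seen-set of substrings and, at each first occurrence, an inner comprehension that gathers all matching start indices (trades A's O(n*k) hashing pass for an O(n^2*k) rescan of similar practical simplicity).
import Mathlib
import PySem

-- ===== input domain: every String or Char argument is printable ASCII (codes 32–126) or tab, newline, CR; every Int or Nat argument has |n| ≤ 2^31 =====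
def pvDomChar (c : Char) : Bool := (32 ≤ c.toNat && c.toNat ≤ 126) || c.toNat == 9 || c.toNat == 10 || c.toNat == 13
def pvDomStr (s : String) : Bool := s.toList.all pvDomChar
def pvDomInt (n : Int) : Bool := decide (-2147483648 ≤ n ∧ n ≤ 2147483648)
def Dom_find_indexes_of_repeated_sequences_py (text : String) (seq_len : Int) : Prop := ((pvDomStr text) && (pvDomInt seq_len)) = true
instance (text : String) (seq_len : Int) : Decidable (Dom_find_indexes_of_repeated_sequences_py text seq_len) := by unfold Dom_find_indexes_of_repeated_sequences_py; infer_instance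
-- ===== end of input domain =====

-- B replaces A's dict-of-lists grouping by a seen-set with an inner rescan per distinct substring
-- (an alternative decomposition, not faster); same return value on every input.

-- ===== PORT A =====
def find_indexes_of_repeated_sequences_py (text : String) (seq_len : Int) : List (List Int) :=
  let d := (PySem.List.pyRange 0 (PySem.Str.len text - seq_len - 1) 1).foldl
    (fun d i =>
      let s := PySem.Str.slice text (some i) (some (i + seq_len))
      let d := if d.contains s then d else d.insert s ([] : List Int)
      d.modify s [] (fun v => v ++ [i]))
    PySem.Dict.empty
  d.values.filter (fun indexes => indexes.length > 1)

-- ===== PORT B =====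
def find_indexes_of_repeated_sequences_py_alt (text : String) (seq_len : Int) : List (List Int) :=
  let n := PySem.Str.len text - seq_len - 1
  ((PySem.List.pyRange 0 n 1).foldl
    (fun acc i =>
      let s := PySem.Str.slice text (some i) (some (i + seq_len))
      if PySem.Set.contains acc.1 s then acc
      else
        let group := (PySem.List.pyRange 0 n 1).filter
          (fun j => PySem.Str.slice text (some j) (some (j + seq_len)) == s)
        (PySem.Set.add acc.1 s, if group.length > 1 then acc.2 ++ [group] else acc.2))
    ((PySem.Set.empty : PySem.Set String), ([] : List (List Int)))).2

-- ===== PRECONDITION & SPEC =====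
def Spec_find_indexes_of_repeated_sequences_py (text : String) (seq_len : Int) (out : List (List Int)) : Prop := out = find_indexes_of_repeated_sequences_py_alt text seq_len
instance (text : String) (seq_len : Int) (out : List (List Int)) : Decidable (Spec_find_indexes_of_repeated_sequences_py text seq_len out) := by unfold Spec_find_indexes_of_repeated_sequences_py; infer_instance

-- ===== CLAIM (what is proved, stated in full; the proofs are below) =====
def Claim_equal_find_indexes_of_repeated_sequences_py : Prop := ∀ (text : String) (seq_len : Int), Dom_find_indexes_of_repeated_sequences_py text seq_len → Spec_find_indexes_of_repeated_sequences_py text seq_len (find_indexes_of_repeated_sequences_py text seq_len)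

-- ===== LEMMAS AND PROOFS =====

-- A's loop body: the setdefault-then-append step is Dict.modify.
theorem pv_stepA (d : PySem.Dict String (List Int)) (s : String) (i : Int) :
    (if d.contains s then d else d.insert s ([] : List Int)).modify s [] (fun v => v ++ [i])
      = d.modify s [] (fun v => v ++ [i]) := by
  by_cases h : d.contains s
  · simp [h]
  · have h' : d.contains s = false := by simpa using h
    simp [h', PySem.Dict.modify, PySem.Dict.getD_insert_self, PySem.Dict.insert_insert_self,
      PySem.Dict.getD_of_not_contains d ([] : List Int) h']

-- the dict-building loop of A, values in closed form
theorem pv_aloop (key : Int → String) (l : List Int) :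
    (l.foldl (fun d i => d.modify (key i) [] (fun v => v ++ [i])) PySem.Dict.empty).values
      = (PySem.Set.ofList (l.map key)).map (fun c => l.filter (fun j => key j == c)) := by
  set ld := l.foldl (fun d i => d.modify (key i) [] (fun v => v ++ [i])) PySem.Dict.empty with hld
  have hnd : ld.keys.Nodup :=
    PySem.Dict.nodup_keys_foldl_modify_key l key [] (fun _ i => fun v => v ++ [i]) _
      PySem.Dict.nodup_keys_empty
  have hkeys : ld.keys = PySem.Set.ofList (l.map key) := by
    rw [hld, PySem.Dict.keys_foldl_modify_key, PySem.Dict.keys_empty]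
    exact PySem.Set.update_empty _
  have hgetD : ∀ c, ld.getD c [] = l.filter (fun j => key j == c) := by
    intro c
    have hm : ld = (l.map (fun i => (key i, i))).foldl
        (fun d p => d.modify p.1 [] (fun v => v ++ [p.2])) PySem.Dict.empty := by
      rw [hld, List.foldl_map]
    rw [hm, PySem.Dict.getD_foldl_modify_append, PySem.Dict.getD_empty, List.nil_append,
      List.filter_map, List.map_map]
    simp [Function.comp_def]
  rw [PySem.Dict.values_eq_map_keys ld hnd [], hkeys]
  apply List.map_congr_left
  intro c _
  exact hgetD c

-- A's result in closed form: one group per distinct substring, in first-occurrence order.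
theorem pv_A_closed (text : String) (seq_len : Int) :
    find_indexes_of_repeated_sequences_py text seq_len =
      ((PySem.Set.ofList ((PySem.List.pyRange 0 (PySem.Str.len text - seq_len - 1) 1).map
          (fun i => PySem.Str.slice text (some i) (some (i + seq_len))))).map
        (fun c => (PySem.List.pyRange 0 (PySem.Str.len text - seq_len - 1) 1).filter
          (fun j => PySem.Str.slice text (some j) (some (j + seq_len)) == c))).filter
        (fun g => g.length > 1) := by
  have hfun : (fun (d : PySem.Dict String (List Int)) (i : Int) =>
      (if d.contains (PySem.Str.slice text (some i) (some (i + seq_len))) then d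
        else d.insert (PySem.Str.slice text (some i) (some (i + seq_len))) ([] : List Int)).modify
        (PySem.Str.slice text (some i) (some (i + seq_len))) [] (fun v => v ++ [i]))
      = fun d i => d.modify (PySem.Str.slice text (some i) (some (i + seq_len))) []
          (fun v => v ++ [i]) := by
    funext d i; exact pv_stepA d _ i
  simp only [find_indexes_of_repeated_sequences_py, hfun]
  rw [pv_aloop (fun i => PySem.Str.slice text (some i) (some (i + seq_len)))]

-- B's loop, with abstract key and gather functions.
theorem pv_filter_discard (s : List String) (x : String) (p : String → Bool) (hp : p x = false) :
    (PySem.Set.discard s x).filter p = s.filter p := by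
  simp only [PySem.Set.discard, List.filter_filter]
  apply List.filter_congr
  intro y _
  by_cases hxy : y = x
  · subst hxy; simp [hp]
  · simp [hxy]

theorem pv_filter_discard_add (s : List String) (seen : PySem.Set String) (x : String) :
    (PySem.Set.discard s x).filter (fun k => !(PySem.Set.contains seen k))
      = s.filter (fun k => !(PySem.Set.contains (PySem.Set.add seen x) k)) := by
  simp only [PySem.Set.discard, List.filter_filter]
  apply List.filter_congr
  intro y _
  by_cases hxy : y = x
  · subst hxy
    simp [(PySem.Set.mem_add seen y y).2 (Or.inr rfl)]
  · simp [hxy]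

theorem pv_bloop (key : Int → String) (gath : String → List Int) (l : List Int)
    (seen : PySem.Set String) (out : List (List Int)) :
    (l.foldl (fun acc i =>
        if PySem.Set.contains acc.1 (key i) then acc
        else (PySem.Set.add acc.1 (key i),
          if (gath (key i)).length > 1 then acc.2 ++ [gath (key i)] else acc.2))
      (seen, out))
    = (PySem.Set.update seen (l.map key),
       out ++ (((PySem.Set.ofList (l.map key)).filter (fun k => !(PySem.Set.contains seen k))).flatMap
          (fun k => if (gath k).length > 1 then [gath k] else []))) := by
  induction l generalizing seen out with
  | nil => simp [PySem.Set.update_nil, PySem.Set.ofList_nil]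
  | cons i l ih =>
    simp only [List.foldl_cons, List.map_cons]
    by_cases h : PySem.Set.contains seen (key i)
    · have hmem : key i ∈ seen := (PySem.Set.contains_iff _ _).1 h
      rw [if_pos h, ih, PySem.Set.update_cons, PySem.Set.add_of_mem hmem,
        PySem.Set.ofList_cons]
      have hp : (fun k => !(PySem.Set.contains seen k)) (key i) = false := by simp [hmem]
      rw [List.filter_cons_of_neg (by simpa using hp), pv_filter_discard _ _ _ hp]
    · have hnmem : key i ∉ seen := fun hm => h ((PySem.Set.contains_iff _ _).2 hm)
      rw [if_neg (by simp [hnmem]), ih, PySem.Set.update_cons, PySem.Set.ofList_cons]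
      have hsplit : (if (gath (key i)).length > 1 then out ++ [gath (key i)] else out)
          = out ++ (if (gath (key i)).length > 1 then [gath (key i)] else []) := by
        split <;> simp
      rw [hsplit]
      have hp : (fun k => !(PySem.Set.contains seen k)) (key i) = true := by simp [hnmem]
      rw [List.filter_cons_of_pos (by simpa using hp), pv_filter_discard_add]
      simp [List.flatMap_cons, List.append_assoc]

-- select-then-wrap equals map-then-filter
theorem pv_flat_if (f : String → List Int) (ks : List String) :
    ks.flatMap (fun k => if (f k).length > 1 then [f k] else [])
      = (ks.map f).filter (fun g => g.length > 1) := by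
  induction ks with
  | nil => simp
  | cons k ks ih =>
    by_cases h : (f k).length > 1 <;> simp [h, ih]

-- ===== VERDICT (by name: the statement is the Claim_ definition above) =====
theorem find_indexes_of_repeated_sequences_py_spec : Claim_equal_find_indexes_of_repeated_sequences_py := by
  intro text seq_len _
  unfold Spec_find_indexes_of_repeated_sequences_py
  rw [pv_A_closed]
  simp only [find_indexes_of_repeated_sequences_py_alt]
  rw [pv_bloop (fun i => PySem.Str.slice text (some i) (some (i + seq_len)))
      (fun k => (PySem.List.pyRange 0 (PySem.Str.len text - seq_len - 1) 1).filter
        (fun j => PySem.Str.slice text (some j) (some (j + seq_len)) == k))]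
  simp only [PySem.Set.empty, List.nil_append]
  rw [show (fun k => !(PySem.Set.contains ([] : PySem.Set String) k)) = fun _ => true by
        funext k; simp [PySem.Set.contains_eq_listContains],
      List.filter_true, pv_flat_if]
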